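-- pv_equiv track=rewrite | github.com/primitiv/primitiv | examples/ptb/ptb_rnnlm.py | make_batch
-- ===== SOURCE A (Python) =====
-- def make_batch(corpus, sent_ids, eos_id):
--     batch_size = len(sent_ids)
--     max_len = 0
--     for sid in sent_ids:
--         max_len = max(max_len, len(corpus[sid]))
--     batch = [[eos_id] * batch_size for i in range(max_len)]
--     for i in range(batch_size):
--         sent = corpus[sent_ids[i]]
--         for j in range(len(sent)):
--             batch[j][i] = sent[j]
--     return batch
-- ===== SOURCE B (Python) =====
-- def make_batch(corpus, sent_ids, eos_id):
--     sents = [corpus[sid] for sid in sent_ids]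
--     batch = []
--     while any(sents):
--         batch.append([s[0] if s else eos_id for s in sents])
--         sents = [s[1:] for s in sents]
--     return batch
-- ===== Notes on version B (the rewrite author's own statement) =====
-- stated objective: idiomatic
-- what changed: Replaces the max-length scan plus pre-filled matrix with in-place overwrites by a column-wise padded transpose that repeatedly emits the heads (eos for exhausted sentences) and peels the tails until all sentences are consumed.
import Mathlib
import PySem

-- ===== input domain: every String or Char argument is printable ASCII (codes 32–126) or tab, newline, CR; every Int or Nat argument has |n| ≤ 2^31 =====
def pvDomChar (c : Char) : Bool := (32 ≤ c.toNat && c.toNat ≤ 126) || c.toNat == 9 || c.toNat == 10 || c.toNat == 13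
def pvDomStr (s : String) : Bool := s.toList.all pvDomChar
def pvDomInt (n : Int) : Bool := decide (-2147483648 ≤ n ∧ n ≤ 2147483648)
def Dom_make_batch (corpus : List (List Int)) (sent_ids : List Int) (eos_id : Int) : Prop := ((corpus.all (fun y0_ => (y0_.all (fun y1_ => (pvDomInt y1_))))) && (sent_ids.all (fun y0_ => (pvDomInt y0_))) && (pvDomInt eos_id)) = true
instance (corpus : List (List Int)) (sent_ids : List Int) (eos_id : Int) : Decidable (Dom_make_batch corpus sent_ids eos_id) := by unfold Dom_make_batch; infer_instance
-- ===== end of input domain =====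

-- B replaces A's max-length scan plus pre-filled matrix overwritten in place by a column-wise
-- padded transpose (emit heads with eos for exhausted sentences, peel tails); same cost, more idiomatic.

-- ===== PORT A =====
-- corpus[sid]: Python indexing (negative from the end); Pre_ guarantees the index is in range,
-- so the `.getD []` fallback is never taken on admitted inputs.
def pvGetSent (corpus : List (List Int)) (sid : Int) : List Int :=
  (PySem.List.pyGet? corpus sid).getD []

def make_batch (corpus : List (List Int)) (sent_ids : List Int) (eos_id : Int) : List (List Int) :=
  let batch_size := sent_ids.length
  let max_len := sent_ids.foldl (fun m sid => max m (pvGetSent corpus sid).length) 0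
  let batch := (List.range max_len).map (fun _ => List.replicate batch_size eos_id)
  (List.range batch_size).foldl
    (fun b i =>
      let sent := pvGetSent corpus (sent_ids.getD i 0)   -- i < batch_size, so getD is exact
      (List.range sent.length).foldl
        (fun b j => b.modify j (fun row => row.set i (sent.getD j 0))) b)  -- batch[j][i] = sent[j]
    batch

-- ===== PORT B =====
-- termination measure facts for the tail-peeling loop (cited by pvTranspose's decreasing_by)
theorem pvTailLenSum_le (l : List (List Int)) :
    ((l.map List.tail).map List.length).sum ≤ (l.map List.length).sum := by
  induction l with
  | nil => simp
  | cons s t ih =>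
    simp only [List.map_cons, List.sum_cons]
    have : s.tail.length ≤ s.length := by cases s <;> simp
    omega

theorem pvTailLenSum_lt (l : List (List Int)) (h : ¬ l.all (·.isEmpty) = true) :
    ((l.map List.tail).map List.length).sum < (l.map List.length).sum := by
  induction l with
  | nil => simp at h
  | cons s t ih =>
    simp only [List.all_cons, Bool.and_eq_true] at h
    simp only [List.map_cons, List.sum_cons]
    by_cases hs : s = []
    · subst hs
      have := ih (by simpa using h)
      simpa using this
    · have h1 : s.tail.length < s.length := by
        cases s with
        | nil => exact absurd rfl hs
        | cons a u => simp
      have h2 := pvTailLenSum_le t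
      omega

-- while any(sents): emit heads (eos for exhausted sentences), peel tails
def pvTranspose (sents : List (List Int)) (eos : Int) : List (List Int) :=
  if h : sents.all (·.isEmpty) = true then []
  else (sents.map (fun s => s.headD eos)) :: pvTranspose (sents.map List.tail) eos
termination_by (sents.map List.length).sum
decreasing_by simpa using pvTailLenSum_lt sents h

def make_batch_alt (corpus : List (List Int)) (sent_ids : List Int) (eos_id : Int) : List (List Int) :=
  pvTranspose (sent_ids.map (fun sid => pvGetSent corpus sid)) eos_id

-- ===== PRECONDITION & SPEC =====
-- Pre_ excludes exactly the inputs where Python's corpus[sid] raises IndexError.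
def Pre_make_batch (corpus : List (List Int)) (sent_ids : List Int) (eos_id : Int) : Prop :=
  ∀ sid ∈ sent_ids, PySem.Raise.InRange corpus.length sid
instance (corpus : List (List Int)) (sent_ids : List Int) (eos_id : Int) : Decidable (Pre_make_batch corpus sent_ids eos_id) := by unfold Pre_make_batch; infer_instance

def pvWitness_make_batch : List (List Int) × List Int × Int := ([[1, 2], [3]], ([0, 1, 0], 9))

def Spec_make_batch (corpus : List (List Int)) (sent_ids : List Int) (eos_id : Int) (out : List (List Int)) : Prop := out = make_batch_alt corpus sent_ids eos_id
instance (corpus : List (List Int)) (sent_ids : List Int) (eos_id : Int) (out : List (List Int)) : Decidable (Spec_make_batch corpus sent_ids eos_id out) := by unfold Spec_make_batch; infer_instance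

-- ===== CLAIM (what is proved, stated in full; the proofs are below) =====
def Claim_equal_make_batch : Prop := ∀ (corpus : List (List Int)) (sent_ids : List Int) (eos_id : Int), Dom_make_batch corpus sent_ids eos_id → Pre_make_batch corpus sent_ids eos_id → Spec_make_batch corpus sent_ids eos_id (make_batch corpus sent_ids eos_id)

-- ===== LEMMAS AND PROOFS =====

-- Common characterization: row j of the batch is [s.getD j eos for s in sents],
-- for j below the maximal sentence length.
def pvMaxLen (l : List (List Int)) : Nat := l.foldl (fun m s => max m s.length) 0

def pvF (sents : List (List Int)) (eos : Int) : List (List Int) :=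
  (List.range (pvMaxLen sents)).map (fun j => sents.map (fun s => s.getD j eos))

theorem pvFoldMax_shift (l : List (List Int)) (a : Nat) :
    l.foldl (fun m s => max m s.length) a
      = max a (l.foldl (fun m s => max m s.length) 0) := by
  induction l generalizing a with
  | nil => simp
  | cons s t ih =>
    simp only [List.foldl_cons]
    rw [ih (max a s.length), ih (max 0 s.length)]
    omega

theorem pvMaxLen_cons (s : List Int) (l : List (List Int)) :
    pvMaxLen (s :: l) = max s.length (pvMaxLen l) := by
  simp only [pvMaxLen, List.foldl_cons]
  rw [pvFoldMax_shift]
  omega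

theorem pvMaxLen_eq_zero (l : List (List Int)) :
    pvMaxLen l = 0 ↔ l.all (·.isEmpty) = true := by
  induction l with
  | nil => simp [pvMaxLen]
  | cons s t ih =>
    rw [pvMaxLen_cons, List.all_cons]
    simp only [Bool.and_eq_true, List.isEmpty_iff, ← ih, ← List.length_eq_zero_iff]
    omega

theorem pvLen_le_maxLen (l : List (List Int)) (s : List Int) (hs : s ∈ l) :
    s.length ≤ pvMaxLen l := by
  induction l with
  | nil => simp at hs
  | cons a t ih =>
    rw [pvMaxLen_cons]
    rcases List.mem_cons.mp hs with hs | hs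
    · subst hs; omega
    · have := ih hs; omega

theorem pvMaxLen_tail (l : List (List Int)) :
    pvMaxLen (l.map List.tail) = pvMaxLen l - 1 := by
  induction l with
  | nil => simp [pvMaxLen]
  | cons s t ih =>
    simp only [List.map_cons]
    rw [pvMaxLen_cons, pvMaxLen_cons, ih]
    have : s.tail.length = s.length - 1 := by cases s <;> simp
    omega

theorem pvHeadD_eq_getD (s : List Int) (e : Int) : s.headD e = s.getD 0 e := by
  cases s <;> simp

theorem pvTailGetD (s : List Int) (j : Nat) (e : Int) :
    s.tail.getD j e = s.getD (j + 1) e := by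
  cases s <;> simp [List.getD]

-- B computes pvF.
theorem pvTranspose_eq_F (n : Nat) (sents : List (List Int)) (eos : Int)
    (hn : pvMaxLen sents = n) : pvTranspose sents eos = pvF sents eos := by
  induction n generalizing sents with
  | zero =>
    have hall : sents.all (·.isEmpty) = true := (pvMaxLen_eq_zero sents).mp hn
    rw [pvTranspose]
    simp [hall, pvF, hn]
  | succ m ih =>
    have hall : ¬ sents.all (·.isEmpty) = true := by
      intro h
      rw [← pvMaxLen_eq_zero] at h
      omega
    rw [pvTranspose, dif_neg hall]
    have htail : pvMaxLen (sents.map List.tail) = m := by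
      rw [pvMaxLen_tail, hn]
      omega
    rw [ih (sents.map List.tail) htail]
    simp only [pvF, hn, htail, List.range_succ_eq_map, List.map_cons, List.map_map]
    congr 1
    · exact List.map_congr_left fun s _ => pvHeadD_eq_getD s eos
    · apply List.map_congr_left
      intro j _
      simp only [Function.comp, Nat.succ_eq_add_one]
      exact List.map_congr_left fun s _ => pvTailGetD s j eos

-- ==== A-side: entrywise analysis of the overwrite loops ====

-- the inner loop, one sentence written into column i
def pvInner (sent : List Int) (i : Nat) (b : List (List Int)) : List (List Int) :=
  (List.range sent.length).foldl
    (fun b j => b.modify j (fun row => row.set i (sent.getD j 0))) b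

theorem pvInnerGen_getElem? (n : Nat) (sent : List Int) (i : Nat) (b : List (List Int)) (j : Nat) :
    ((List.range n).foldl (fun b j => b.modify j (fun row => row.set i (sent.getD j 0))) b)[j]? =
      if j < n then (b[j]?).map (fun row => row.set i (sent.getD j 0)) else b[j]? := by
  induction n generalizing b with
  | zero => simp
  | succ m ih =>
    rw [List.range_succ, List.foldl_append, List.foldl_cons, List.foldl_nil,
      List.getElem?_modify, ih]
    by_cases hj : j = m
    · subst hj
      simp only [lt_irrefl, Nat.lt_succ_self, if_true, ite_false]
      cases b[j]? <;> simp
    · have hm : ¬ m = j := fun h => hj h.symm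
      by_cases hlt : j < m
      · simp only [hlt, if_true, Nat.lt_succ_of_lt hlt]
        cases b[j]? <;> simp [hm]
      · have hlt' : ¬ j < m + 1 := by omega
        simp only [hlt, hlt', if_false]
        cases b[j]? <;> simp [hm]

theorem pvInner_getElem? (sent : List Int) (i : Nat) (b : List (List Int)) (j : Nat) :
    (pvInner sent i b)[j]? =
      if j < sent.length then (b[j]?).map (fun row => row.set i (sent.getD j 0)) else b[j]? :=
  pvInnerGen_getElem? sent.length sent i b j

theorem pvInner_length (sent : List Int) (i : Nat) (b : List (List Int)) :
    (pvInner sent i b).length = b.length := by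
  unfold pvInner
  induction (List.range sent.length) generalizing b with
  | nil => simp
  | cons x t ih =>
    rw [List.foldl_cons, ih, List.length_modify]

def pvOuter (g : Nat → List Int) (n : Nat) (b : List (List Int)) : List (List Int) :=
  (List.range n).foldl (fun b k => pvInner (g k) k b) b

theorem pvOuter_length (g : Nat → List Int) (n : Nat) (b : List (List Int)) :
    (pvOuter g n b).length = b.length := by
  unfold pvOuter
  induction n with
  | zero => simp
  | succ m ih =>
    rw [List.range_succ, List.foldl_append, List.foldl_cons, List.foldl_nil,
      pvInner_length, ih]

theorem pvInner_rows (sent : List Int) (i : Nat) (b : List (List Int)) (bsz : Nat)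
    (hb : ∀ (j : Nat) (row : List Int), b[j]? = some row → row.length = bsz) :
    ∀ (j : Nat) (row : List Int), (pvInner sent i b)[j]? = some row → row.length = bsz := by
  intro j row h
  rw [pvInner_getElem?] at h
  split at h
  · cases hbj : b[j]? with
    | none => rw [hbj] at h; simp at h
    | some r =>
      rw [hbj] at h
      simp only [Option.map_some, Option.some.injEq] at h
      rw [← h, List.length_set]
      exact hb j r hbj
  · exact hb j row h

theorem pvOuter_rows (g : Nat → List Int) (n : Nat) (b : List (List Int)) (bsz : Nat)
    (hb : ∀ (j : Nat) (row : List Int), b[j]? = some row → row.length = bsz) :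
    ∀ (j : Nat) (row : List Int), (pvOuter g n b)[j]? = some row → row.length = bsz := by
  induction n with
  | zero => simpa [pvOuter] using hb
  | succ m ih =>
    unfold pvOuter
    rw [List.range_succ, List.foldl_append, List.foldl_cons, List.foldl_nil]
    exact pvInner_rows (g m) m _ bsz ih

-- key invariant: entry (j, i) after writing columns 0..n-1
theorem pvOuter_entry (g : Nat → List Int) (n : Nat) (b : List (List Int)) (bsz : Nat)
    (i j : Nat)
    (hb : ∀ (j' : Nat) (row : List Int), b[j']? = some row → row.length = bsz)
    (hi : i < bsz)
    (hg : ∀ k, k < n → (g k).length ≤ b.length) :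
    ((pvOuter g n b)[j]?.bind (fun row => row[i]?)) =
      if i < n ∧ j < (g i).length then some ((g i).getD j 0)
      else (b[j]?.bind (fun row => row[i]?)) := by
  induction n with
  | zero => simp [pvOuter]
  | succ m ih =>
    have hg' : ∀ k, k < m → (g k).length ≤ b.length := fun k hk => hg k (by omega)
    have IH := ih hg'
    have hBlen : (pvOuter g m b).length = b.length := pvOuter_length g m b
    have hBrows := pvOuter_rows g m b bsz hb
    unfold pvOuter
    rw [List.range_succ, List.foldl_append, List.foldl_cons, List.foldl_nil]
    have hstep : ((List.range m).foldl (fun b k => pvInner (g k) k b) b) = pvOuter g m b := rfl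
    rw [hstep, pvInner_getElem?]
    by_cases hj : j < (g m).length
    · -- row j exists in pvOuter g m b
      have hjb : j < (pvOuter g m b).length := by
        rw [hBlen]; exact lt_of_lt_of_le hj (hg m (by omega))
      have hrowA : (pvOuter g m b)[j]? = some (pvOuter g m b)[j] := List.getElem?_eq_getElem hjb
      have hrowlen : (pvOuter g m b)[j].length = bsz := hBrows j _ hrowA
      have IH2 : (pvOuter g m b)[j][i]? =
          if i < m ∧ j < (g i).length then some ((g i).getD j 0)
          else (b[j]?.bind (fun row => row[i]?)) := by
        rw [hrowA] at IH
        simpa using IH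
      rw [hrowA]
      simp only [hj, if_true, Option.map_some, Option.bind_some]
      by_cases him : i = m
      · subst him
        rw [List.getElem?_set]
        simp only [hrowlen, hi, if_true]
        simp [hj]
      · rw [List.getElem?_set, if_neg (fun h => him h.symm), IH2]
        have hiff : (i < m) = (i < m + 1) := propext (by omega)
        simp only [hiff]
    · rw [if_neg hj, IH]
      by_cases him : i = m
      · subst him
        simp [hj]
      · have hiff : (i < m) = (i < m + 1) := propext (by omega)
        simp only [hiff]

-- the outer loop, seeded with the eos-filled matrix, computes pvF
theorem pvOuter_eq_F (sents : List (List Int)) (eos : Int) (g : Nat → List Int)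
    (hg : ∀ (k : Nat) (hk : k < sents.length), g k = sents[k]) :
    pvOuter g sents.length
        ((List.range (pvMaxLen sents)).map (fun _ => List.replicate sents.length eos))
      = pvF sents eos := by
  have hb0rows : ∀ (j' : Nat) (row : List Int),
      ((List.range (pvMaxLen sents)).map (fun _ => List.replicate sents.length eos))[j']?
        = some row → row.length = sents.length := by
    intro j' row h
    rw [List.getElem?_map] at h
    cases hr : (List.range (pvMaxLen sents))[j']? with
    | none => rw [hr] at h; simp at h
    | some r =>
      rw [hr] at h
      simp only [Option.map_some, Option.some.injEq] at h
      rw [← h, List.length_replicate]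
  have hb0len : ((List.range (pvMaxLen sents)).map
      (fun _ => List.replicate sents.length eos)).length = pvMaxLen sents := by
    rw [List.length_map, List.length_range]
  have hglen : ∀ k, k < sents.length →
      (g k).length ≤ ((List.range (pvMaxLen sents)).map
        (fun _ => List.replicate sents.length eos)).length := by
    intro k hk
    rw [hb0len, hg k hk]
    exact pvLen_le_maxLen sents _ (List.getElem_mem hk)
  apply List.ext_getElem?
  intro j
  have houtlen : (pvOuter g sents.length
      ((List.range (pvMaxLen sents)).map (fun _ => List.replicate sents.length eos))).length
        = pvMaxLen sents := by
    rw [pvOuter_length, hb0len]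
  have hFlen : (pvF sents eos).length = pvMaxLen sents := by
    rw [pvF, List.length_map, List.length_range]
  by_cases hj : j < pvMaxLen sents
  · have hb0j : ((List.range (pvMaxLen sents)).map
        (fun _ => List.replicate sents.length eos))[j]? = some (List.replicate sents.length eos) := by
      rw [List.getElem?_map, List.getElem?_range hj]
      rfl
    have hjb : j < (pvOuter g sents.length
        ((List.range (pvMaxLen sents)).map (fun _ => List.replicate sents.length eos))).length := by
      omega
    have hrowA := List.getElem?_eq_getElem hjb
    have hrAlen := pvOuter_rows g sents.length _ sents.length hb0rows j _ hrowA
    have hF : (pvF sents eos)[j]? = some (sents.map (fun s => s.getD j eos)) := by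
      rw [pvF, List.getElem?_map, List.getElem?_range hj]
      rfl
    rw [hrowA, hF]
    congr 1
    apply List.ext_getElem?
    intro i
    by_cases hi : i < sents.length
    · have hent := pvOuter_entry g sents.length
        ((List.range (pvMaxLen sents)).map (fun _ => List.replicate sents.length eos))
        sents.length i j hb0rows hi hglen
      rw [hrowA, hb0j] at hent
      simp only [Option.bind_some] at hent
      rw [hent, List.getElem?_map, List.getElem?_eq_getElem hi]
      simp only [Option.map_some, hg i hi, List.getElem?_replicate, if_true, hi, true_and]
      by_cases hjlen : j < sents[i].length
      · rw [if_pos hjlen]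
        rw [List.getD_eq_getElem sents[i] 0 hjlen, List.getD_eq_getElem sents[i] eos hjlen]
      · rw [if_neg hjlen, List.getD_eq_default sents[i] eos (by omega)]
    · rw [List.getElem?_eq_none (by rw [hrAlen]; omega),
        List.getElem?_eq_none (by rw [List.length_map]; omega)]
  · rw [List.getElem?_eq_none (by omega), List.getElem?_eq_none (by omega)]

-- A computes pvF.
theorem pvMakeA_eq_F (corpus : List (List Int)) (sent_ids : List Int) (eos : Int) :
    make_batch corpus sent_ids eos
      = pvF (sent_ids.map (fun sid => pvGetSent corpus sid)) eos := by
  have hml : sent_ids.foldl (fun m sid => max m (pvGetSent corpus sid).length) 0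
      = pvMaxLen (sent_ids.map (fun sid => pvGetSent corpus sid)) := by
    rw [pvMaxLen, List.foldl_map]
  have hA : make_batch corpus sent_ids eos
      = pvOuter (fun i => pvGetSent corpus (sent_ids.getD i 0))
          (sent_ids.map (fun sid => pvGetSent corpus sid)).length
          ((List.range (pvMaxLen (sent_ids.map (fun sid => pvGetSent corpus sid)))).map
            (fun _ => List.replicate (sent_ids.map (fun sid => pvGetSent corpus sid)).length eos)) := by
    simp only [make_batch, pvOuter, pvInner, hml, List.length_map]
  rw [hA]
  apply pvOuter_eq_F
  intro k hk
  rw [List.length_map] at hk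
  rw [List.getElem_map]
  congr 1
  exact List.getD_eq_getElem sent_ids 0 hk

-- ===== VERDICT (by name: the statement is the Claim_ definition above) =====
theorem make_batch_spec : Claim_equal_make_batch := by
  intro corpus sent_ids eos_id _ _
  unfold Spec_make_batch make_batch_alt
  rw [pvMakeA_eq_F]
  exact (pvTranspose_eq_F (pvMaxLen _) _ eos_id rfl).symm
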